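-- pv_equiv track=rewrite | github.com/Maqaleed-Digital/PetCare-Evidence-Repository | petcare_execution/evidence_output/PETCARE-PH42-CLOSURE/20260225T125249Z/snapshots/scripts/petcare_notion_phase_registry_reconcile.py | canon_domain
-- ===== SOURCE A (Python) =====
-- def norm(s: str) -> str:
--   return (s or "").strip()
--
-- def canon_domain(s: str) -> str:
--   raw = norm(s)
--   if not raw:
--     return ""
--   t = raw.replace("&", ",").replace("/", ",")
--   parts = [p.strip() for p in t.split(",") if p.strip()]
--   tokens = set()
--   for p in parts:
--     pl = p.lower()
--     if pl == "ops" or pl == "operations":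
--       tokens.add("Ops")
--       continue
--     if pl == "security":
--       tokens.add("Security")
--       continue
--     if pl == "ci":
--       tokens.add("CI")
--       continue
--     if pl == "evidence":
--       tokens.add("Evidence")
--       continue
--     if pl == "governance":
--       tokens.add("Governance")
--       continue
--     if pl == "foundation":
--       tokens.add("Foundation")
--       continue
--     if pl == "architecture":
--       tokens.add("Architecture")
--       continue
--     if pl == "product":
--       tokens.add("Product")
--       continue
--     tokens.add(p)
--
--   if tokens == {"Ops", "Security"}:
--     return "Security/Ops"
--   if tokens == {"CI", "Ops", "Security"}:
--     return "CI/Security/Ops"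
--
--   order = ["Foundation", "Architecture", "Product", "Governance", "Evidence", "Security", "Ops", "CI"]
--   out = []
--   for o in order:
--     if o in tokens:
--       out.append(o)
--       tokens.remove(o)
--   out.extend(sorted(tokens))
--   return "/".join(out)
-- ===== SOURCE B (Python) =====
-- CANON = {
--     "ops": "Ops", "operations": "Ops", "security": "Security", "ci": "CI",
--     "evidence": "Evidence", "governance": "Governance", "foundation": "Foundation",
--     "architecture": "Architecture", "product": "Product",
-- }
-- ORDER = ["Foundation", "Architecture", "Product", "Governance", "Evidence", "Security", "Ops", "CI"]
-- PRIORITY = {name: i for i, name in enumerate(ORDER)}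
--
-- def canon_domain(s: str) -> str:
--     text = (s or "").strip().replace("&", ",").replace("/", ",")
--     tokens = {CANON.get(w.strip().lower(), w.strip()) for w in text.split(",") if w.strip()}
--     if tokens == {"CI", "Ops", "Security"}:
--         return "CI/Security/Ops"
--     return "/".join(sorted(tokens, key=lambda t: str(PRIORITY.get(t, len(ORDER))) + t))
-- ===== Notes on version B (the rewrite author's own statement) =====
-- stated objective: simpler
-- what changed: Replaced A's nine-way if-elif canonicalization chain with a dict lookup and replaced A's order-loop-plus-sorted-leftovers emission (and the redundant {Ops,Security} special case) with one sort keyed by a priority dict, keeping only the {CI,Ops,Security} special case.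
import Mathlib
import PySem

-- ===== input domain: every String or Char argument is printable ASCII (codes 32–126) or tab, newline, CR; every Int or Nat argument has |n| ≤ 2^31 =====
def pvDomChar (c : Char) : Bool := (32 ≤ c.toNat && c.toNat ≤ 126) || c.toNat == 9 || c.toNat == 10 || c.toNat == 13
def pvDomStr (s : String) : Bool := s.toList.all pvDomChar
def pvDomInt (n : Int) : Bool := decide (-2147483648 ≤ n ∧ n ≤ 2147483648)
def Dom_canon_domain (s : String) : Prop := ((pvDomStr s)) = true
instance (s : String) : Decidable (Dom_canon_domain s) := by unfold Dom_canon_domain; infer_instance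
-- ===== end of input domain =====

-- B replaces A's nine-way if-chain and order-loop emission by a canonical-name dict and a single
-- priority-keyed sort (objective: simpler); same return value on every input.

-- ===== PORT A =====
-- norm(s): '(s or "").strip()' — for a String argument this is strip s ('' strips to '')
def pvNormA (s : String) : String := PySem.Str.strip s

-- the body of A's 'for p in parts' loop (the if-chain adding the canonical token)
def pvAddTokA (tk : PySem.Set String) (p : String) : PySem.Set String :=
  let pl := PySem.Str.lower p
  if pl = "ops" ∨ pl = "operations" then tk.add "Ops"
  else if pl = "security" then tk.add "Security"
  else if pl = "ci" then tk.add "CI"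
  else if pl = "evidence" then tk.add "Evidence"
  else if pl = "governance" then tk.add "Governance"
  else if pl = "foundation" then tk.add "Foundation"
  else if pl = "architecture" then tk.add "Architecture"
  else if pl = "product" then tk.add "Product"
  else tk.add p

def canon_domain (s : String) : String :=
  let raw := pvNormA s
  if raw = "" then ""
  else
    let t := PySem.Str.replace (PySem.Str.replace raw "&" ",") "/" ","
    -- [p.strip() for p in t.split(",") if p.strip()]
    let parts := (((PySem.Str.split? t ",").getD []).filter
        (fun p => !(PySem.Str.strip p == ""))).map PySem.Str.strip
    let tokens := parts.foldl pvAddTokA PySem.Set.empty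
    if PySem.Set.equal tokens (PySem.Set.ofList ["Ops", "Security"]) then "Security/Ops"
    else if PySem.Set.equal tokens (PySem.Set.ofList ["CI", "Ops", "Security"]) then "CI/Security/Ops"
    else
      let order := ["Foundation", "Architecture", "Product", "Governance", "Evidence", "Security", "Ops", "CI"]
      -- for o in order: if o in tokens: out.append(o); tokens.remove(o)
      -- (the membership guard makes 'remove' = 'discard'; KeyError is unreachable)
      let fin := order.foldl
        (fun (st : List String × PySem.Set String) o =>
          if PySem.Set.contains st.2 o then (st.1 ++ [o], PySem.Set.discard st.2 o) else st)
        ([], tokens)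
      PySem.Str.join "/" (fin.1 ++ PySem.List.sorted fin.2 (fun x => x))

-- ===== PORT B =====
def pvCanon : PySem.Dict String String :=
  PySem.Dict.ofList
    [("ops", "Ops"), ("operations", "Ops"), ("security", "Security"), ("ci", "CI"),
     ("evidence", "Evidence"), ("governance", "Governance"), ("foundation", "Foundation"),
     ("architecture", "Architecture"), ("product", "Product")]

def pvOrder : List String :=
  ["Foundation", "Architecture", "Product", "Governance", "Evidence", "Security", "Ops", "CI"]

-- PRIORITY = {name: i for i, name in enumerate(ORDER)}
def pvPriority : PySem.Dict String Int :=
  (PySem.List.enumerate pvOrder).foldl (fun d p => d.insert p.2 p.1) PySem.Dict.empty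

-- key=lambda t: str(PRIORITY.get(t, len(ORDER))) + t — Python compares strings as
-- code-point-lexicographic sequences, i.e. as List Char under its lexicographic order
def pvKey (t : String) : List Char :=
  (PySem.Int.toStr (pvPriority.getD t (pvOrder.length : Int))).toList ++ t.toList

def canon_domain_alt (s : String) : String :=
  let text := PySem.Str.replace (PySem.Str.replace (PySem.Str.strip s) "&" ",") "/" ","
  -- {CANON.get(w.strip().lower(), w.strip()) for w in text.split(",") if w.strip()}
  let tokens := PySem.Set.ofList
    ((((PySem.Str.split? text ",").getD []).filter
        (fun w => !(PySem.Str.strip w == ""))).map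
      (fun w => pvCanon.getD (PySem.Str.lower (PySem.Str.strip w)) (PySem.Str.strip w)))
  if PySem.Set.equal tokens (PySem.Set.ofList ["CI", "Ops", "Security"]) then "CI/Security/Ops"
  else PySem.Str.join "/" (PySem.List.sorted tokens pvKey)

-- ===== PRECONDITION & SPEC =====
def Spec_canon_domain (s : String) (out : String) : Prop := out = canon_domain_alt s
instance (s : String) (out : String) : Decidable (Spec_canon_domain s out) := by unfold Spec_canon_domain; infer_instance

-- ===== CLAIM (what is proved, stated in full; the proofs are below) =====
def Claim_equal_canon_domain : Prop := ∀ (s : String), Dom_canon_domain s → Spec_canon_domain s (canon_domain s)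

-- ===== LEMMAS AND PROOFS =====

theorem pvAddTokA_eq (tk : PySem.Set String) (p : String) :
    pvAddTokA tk p = tk.add (pvCanon.getD (PySem.Str.lower p) p) := by
  have hC : pvCanon.items = [("ops", "Ops"), ("operations", "Ops"), ("security", "Security"), ("ci", "CI"),
     ("evidence", "Evidence"), ("governance", "Governance"), ("foundation", "Foundation"),
     ("architecture", "Architecture"), ("product", "Product")] := by decide
  unfold pvAddTokA
  simp only [PySem.Dict.getD, PySem.Dict.get?, hC, List.find?]
  split_ifs with h1 h2 h3 h4 h5 h6 h7 h8
  · rcases h1 with h | h <;> rw [h] <;> rfl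
  · rw [h2]; rfl
  · rw [h3]; rfl
  · rw [h4]; rfl
  · rw [h5]; rfl
  · rw [h6]; rfl
  · rw [h7]; rfl
  · rw [h8]; rfl
  · rcases not_or.mp h1 with ⟨h1a, h1b⟩
    have n1 : ¬("ops" = PySem.Str.lower p) := fun e => h1a e.symm
    have n2 : ¬("operations" = PySem.Str.lower p) := fun e => h1b e.symm
    have n3 : ¬("security" = PySem.Str.lower p) := fun e => h2 e.symm
    have n4 : ¬("ci" = PySem.Str.lower p) := fun e => h3 e.symm
    have n5 : ¬("evidence" = PySem.Str.lower p) := fun e => h4 e.symm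
    have n6 : ¬("governance" = PySem.Str.lower p) := fun e => h5 e.symm
    have n7 : ¬("foundation" = PySem.Str.lower p) := fun e => h6 e.symm
    have n8 : ¬("architecture" = PySem.Str.lower p) := fun e => h7 e.symm
    have n9 : ¬("product" = PySem.Str.lower p) := fun e => h8 e.symm
    simp only [show ("ops" == PySem.Str.lower p) = false from beq_eq_false_iff_ne.2 n1,
      show ("operations" == PySem.Str.lower p) = false from beq_eq_false_iff_ne.2 n2,
      show ("security" == PySem.Str.lower p) = false from beq_eq_false_iff_ne.2 n3,
      show ("ci" == PySem.Str.lower p) = false from beq_eq_false_iff_ne.2 n4,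
      show ("evidence" == PySem.Str.lower p) = false from beq_eq_false_iff_ne.2 n5,
      show ("governance" == PySem.Str.lower p) = false from beq_eq_false_iff_ne.2 n6,
      show ("foundation" == PySem.Str.lower p) = false from beq_eq_false_iff_ne.2 n7,
      show ("architecture" == PySem.Str.lower p) = false from beq_eq_false_iff_ne.2 n8,
      show ("product" == PySem.Str.lower p) = false from beq_eq_false_iff_ne.2 n9,
      Option.map, Option.getD]

theorem pvKey_not_mem (t : String) (h : t ∉ pvOrder) : pvKey t = '8' :: t.toList := by
  simp only [pvOrder, List.mem_cons, List.not_mem_nil, or_false, not_or] at h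
  obtain ⟨h1, h2, h3, h4, h5, h6, h7, h8⟩ := h
  have hP : pvPriority.items = [("Foundation", (0:Int)), ("Architecture", 1), ("Product", 2),
      ("Governance", 3), ("Evidence", 4), ("Security", 5), ("Ops", 6), ("CI", 7)] := by decide
  unfold pvKey
  rw [PySem.Dict.getD, PySem.Dict.get?, hP]
  simp only [List.find?,
    show ("Foundation" == t) = false from beq_eq_false_iff_ne.2 (fun e => h1 e.symm),
    show ("Architecture" == t) = false from beq_eq_false_iff_ne.2 (fun e => h2 e.symm),
    show ("Product" == t) = false from beq_eq_false_iff_ne.2 (fun e => h3 e.symm),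
    show ("Governance" == t) = false from beq_eq_false_iff_ne.2 (fun e => h4 e.symm),
    show ("Evidence" == t) = false from beq_eq_false_iff_ne.2 (fun e => h5 e.symm),
    show ("Security" == t) = false from beq_eq_false_iff_ne.2 (fun e => h6 e.symm),
    show ("Ops" == t) = false from beq_eq_false_iff_ne.2 (fun e => h7 e.symm),
    show ("CI" == t) = false from beq_eq_false_iff_ne.2 (fun e => h8 e.symm),
    Option.map, Option.getD]
  rfl

theorem pvKey_lt_of_lt (a b : String) (ha : a ∉ pvOrder) (hb : b ∉ pvOrder) (hab : a < b) :
    pvKey a < pvKey b := by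
  rw [pvKey_not_mem a ha, pvKey_not_mem b hb, List.cons_lt_cons_iff]
  exact Or.inr ⟨rfl, String.lt_iff_toList_lt.mp hab⟩

theorem pvKey_mem_lt_not_mem (a b : String) (ha : a ∈ pvOrder) (hb : b ∉ pvOrder) :
    pvKey a < pvKey b := by
  rw [pvKey_not_mem b hb]
  simp only [pvOrder, List.mem_cons, List.not_mem_nil, or_false] at ha
  rcases ha with h | h | h | h | h | h | h | h <;> subst h
  · rw [show pvKey "Foundation" = '0' :: "Foundation".toList from by decide, List.cons_lt_cons_iff]
    exact Or.inl (by decide)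
  · rw [show pvKey "Architecture" = '1' :: "Architecture".toList from by decide, List.cons_lt_cons_iff]
    exact Or.inl (by decide)
  · rw [show pvKey "Product" = '2' :: "Product".toList from by decide, List.cons_lt_cons_iff]
    exact Or.inl (by decide)
  · rw [show pvKey "Governance" = '3' :: "Governance".toList from by decide, List.cons_lt_cons_iff]
    exact Or.inl (by decide)
  · rw [show pvKey "Evidence" = '4' :: "Evidence".toList from by decide, List.cons_lt_cons_iff]
    exact Or.inl (by decide)
  · rw [show pvKey "Security" = '5' :: "Security".toList from by decide, List.cons_lt_cons_iff]
    exact Or.inl (by decide)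
  · rw [show pvKey "Ops" = '6' :: "Ops".toList from by decide, List.cons_lt_cons_iff]
    exact Or.inl (by decide)
  · rw [show pvKey "CI" = '7' :: "CI".toList from by decide, List.cons_lt_cons_iff]
    exact Or.inl (by decide)


theorem pvLoop_spec (os : List String) (hos : os.Nodup) (out : List String) (T : PySem.Set String) :
    os.foldl
        (fun (st : List String × PySem.Set String) o =>
          if PySem.Set.contains st.2 o then (st.1 ++ [o], PySem.Set.discard st.2 o) else st)
        (out, T)
      = (out ++ os.filter (fun o => T.contains o), T.filter (fun x => !(os.contains x))) := by
  induction os generalizing out T with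
  | nil => simp
  | cons o os ih =>
    rcases List.nodup_cons.mp hos with ⟨ho, hos'⟩
    simp only [List.foldl_cons]
    by_cases hc : PySem.Set.contains T o
    · have hoT : o ∈ T := (PySem.Set.contains_iff T o).mp hc
      rw [if_pos hc, ih hos']
      refine Prod.ext ?_ ?_
      · show out ++ [o] ++ _ = out ++ _
        have h1 : os.filter (fun x => (PySem.Set.discard T o).contains x)
            = os.filter (fun x => T.contains x) :=
          List.filter_congr (fun x hx => by
            have hxo : x ≠ o := fun e => ho (e ▸ hx)
            simp [PySem.Set.contains, PySem.Set.discard, List.contains_eq_mem, List.mem_filter, hxo])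
        rw [List.filter_cons_of_pos (by simpa [PySem.Set.contains, List.contains_eq_mem] using hoT),
          h1, List.append_assoc]
        rfl
      · show (PySem.Set.discard T o).filter _ = _
        rw [PySem.Set.discard, List.filter_filter]
        refine List.filter_congr (fun x _ => ?_)
        simp only [List.contains_cons, Bool.not_or]
        rw [Bool.and_comm]
    · have hoT : o ∉ T := fun h => hc ((PySem.Set.contains_iff T o).mpr h)
      rw [if_neg hc, ih hos']
      refine Prod.ext ?_ ?_
      · show out ++ _ = out ++ _
        rw [List.filter_cons_of_neg (by simpa [PySem.Set.contains, List.contains_eq_mem] using hoT)]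
      · refine List.filter_congr (fun x hx => ?_)
        have hxo : x ≠ o := fun e => hoT (e ▸ hx)
        simp [hxo]


theorem pvSorted_bridge (T : List String) (k : String → List Char) :
    @PySem.List.sorted String (List Char) List.instLT (fun a b => a.decidableLT b) T k false
    = @PySem.List.sorted String (List Char) List.instLinearOrder.toLT
        LinearOrder.toDecidableLT T k false := by
  simp only [PySem.List.sorted, Bool.false_eq_true, if_false]
  congr 1
  funext acc x
  congr 1
  funext a b
  exact decide_eq_decide.mpr Iff.rfl

theorem pvEmit_eq (T : PySem.Set String) (hN : T.Nodup) :
    pvOrder.filter (fun o => T.contains o)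
        ++ PySem.List.sorted (T.filter (fun x => !(pvOrder.contains x))) (fun x => x)
      = PySem.List.sorted T pvKey := by
  have hOn : pvOrder.Nodup := by decide
  have hLn : (pvOrder.filter (fun o => T.contains o)).Nodup := hOn.filter _
  have hRperm : (PySem.List.sorted (T.filter (fun x => !(pvOrder.contains x))) (fun x => x)).Perm
      (T.filter (fun x => !(pvOrder.contains x))) := PySem.List.sorted_perm _ _ _
  have hRn : (PySem.List.sorted (T.filter (fun x => !(pvOrder.contains x))) (fun x => x)).Nodup :=
    hRperm.symm.nodup (hN.filter _)
  have hRmem : ∀ b ∈ PySem.List.sorted (T.filter (fun x => !(pvOrder.contains x))) (fun x => x),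
      b ∉ pvOrder := by
    intro b hb
    have := hRperm.mem_iff.mp hb
    rcases List.mem_filter.mp this with ⟨_, hb2⟩
    simpa [List.contains_eq_mem] using hb2
  have hLperm : (pvOrder.filter (fun o => T.contains o)).Perm
      (T.filter (fun x => pvOrder.contains x)) := by
    refine (List.perm_ext_iff_of_nodup hLn (hN.filter _)).mpr (fun a => ?_)
    simp only [List.mem_filter, PySem.Set.contains, List.contains_eq_mem, decide_eq_true_eq]
    tauto
  rw [pvSorted_bridge]
  refine (PySem.List.sorted_eq_of_perm_of_pairwise_lt T _ pvKey ?_ ?_).symm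
  · exact (hLperm.append hRperm).trans (List.filter_append_perm _ T)
  · refine List.pairwise_append.mpr ⟨?_, ?_, ?_⟩
    · exact List.Pairwise.sublist List.filter_sublist
        (by decide : List.Pairwise (fun a b => pvKey a < pvKey b) pvOrder)
    · have hle := PySem.List.sorted_pairwise (T.filter (fun x => !(pvOrder.contains x))) (fun x => x)
      refine (hle.and hRn).imp_of_mem (fun {a b} ha hb hab => ?_)
      exact pvKey_lt_of_lt a b (hRmem a ha) (hRmem b hb) (lt_of_le_of_ne hab.1 hab.2)
    · intro a ha b hb
      exact pvKey_mem_lt_not_mem a b (List.mem_of_mem_filter ha) (hRmem b hb)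

theorem pvPerm_pair (T : List String) (a b : String) (hab : a ≠ b) (h : T.Perm [a, b]) :
    T = [a, b] ∨ T = [b, a] := by
  have hnd : T.Nodup := h.symm.nodup (by simp [hab])
  have hlen : T.length = 2 := h.length_eq
  match T, hlen with
  | [x, y], _ =>
    have hx : x ∈ ([a, b] : List String) := h.mem_iff.mp (by simp)
    have hy : y ∈ ([a, b] : List String) := h.mem_iff.mp (by simp)
    have hxy : x ≠ y := by simpa using (List.nodup_cons.mp hnd).1
    simp only [List.mem_cons, List.not_mem_nil, or_false] at hx hy
    rcases hx with rfl | rfl <;> rcases hy with rfl | rfl <;> simp_all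

-- ===== VERDICT (by name: the statement is the Claim_ definition above) =====

-- A's token loop = B's set comprehension, for the shared parts list
theorem pvTokens_eq (L : List String) :
    (L.map PySem.Str.strip).foldl pvAddTokA PySem.Set.empty
      = PySem.Set.ofList
          (L.map (fun w => pvCanon.getD (PySem.Str.lower (PySem.Str.strip w)) (PySem.Str.strip w))) := by
  have hf : (fun (tk : PySem.Set String) w => pvAddTokA tk (PySem.Str.strip w))
      = (fun (tk : PySem.Set String) w =>
          PySem.Set.add tk (pvCanon.getD (PySem.Str.lower (PySem.Str.strip w)) (PySem.Str.strip w))) :=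
    funext fun tk => funext fun w => pvAddTokA_eq tk (PySem.Str.strip w)
  rw [PySem.Set.ofList_eq_foldl, List.foldl_map, List.foldl_map, hf]
  rfl

theorem canon_domain_spec : Claim_equal_canon_domain := by
  intro s _
  unfold Spec_canon_domain
  show canon_domain s = canon_domain_alt s
  by_cases h0 : PySem.Str.strip s = ""
  · simp only [canon_domain, canon_domain_alt, pvNormA, h0]
    decide
  · simp only [canon_domain, canon_domain_alt, pvNormA, if_neg h0]
    rw [pvTokens_eq]
    set T := PySem.Set.ofList
      ((((PySem.Str.split? (PySem.Str.replace (PySem.Str.replace (PySem.Str.strip s) "&" ",") "/" ",")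
          ",").getD []).filter (fun p => !(PySem.Str.strip p == ""))).map
        (fun w => pvCanon.getD (PySem.Str.lower (PySem.Str.strip w)) (PySem.Str.strip w))) with hT
    have hTn : T.Nodup := PySem.Set.nodup_ofList _
    by_cases hA1 : PySem.Set.equal T (PySem.Set.ofList ["Ops", "Security"])
    · have hmem := (PySem.Set.equal_iff _ _).mp hA1
      have hCI : "CI" ∉ T := fun hc => by simpa using (hmem "CI").mp hc
      have hB : ¬ PySem.Set.equal T (PySem.Set.ofList ["CI", "Ops", "Security"]) = true := by
        intro he
        exact hCI (((PySem.Set.equal_iff _ _).mp he "CI").mpr (by decide))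
      rw [if_pos hA1, if_neg hB]
      have hperm : T.Perm ["Ops", "Security"] :=
        (List.perm_ext_iff_of_nodup hTn (by decide)).mpr (fun x => hmem x)
      rcases pvPerm_pair T _ _ (by decide) hperm with h | h <;> rw [h] <;> decide
    · by_cases hA2 : PySem.Set.equal T (PySem.Set.ofList ["CI", "Ops", "Security"])
      · rw [if_neg hA1, if_pos hA2, if_pos hA2]
      · rw [if_neg hA1, if_neg hA2, if_neg hA2]
        rw [pvLoop_spec _ (by decide) [] T]
        have he := pvEmit_eq T hTn
        unfold pvOrder at he
        rw [List.nil_append, ← he]
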